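-- pv_equiv track=rewrite | github.com/Nyapy/TIL | 04_algorithm/32day/정식이의 은행업무.py | trant
-- ===== SOURCE A (Python) =====
-- def trant(ar):
--     a = len(ar) - 1
--     val = 0
--     sq = 1
--     while a >= 0:
--         if ar[a] != 0:
--             val += ar[a] * sq
--
--         sq *= 3
--         a -= 1
--
--     return val
-- ===== SOURCE B (Python) =====
-- def trant(ar):
--     val = 0
--     for d in ar:
--         val = val * 3 + d
--     return val
-- ===== Notes on version B (the rewrite author's own statement) =====
-- stated objective: simpler
-- what changed: Replaced the reverse index loop with an explicit power-of-3 accumulator and skip-zero branch by a single forward Horner pass (val = val*3 + d).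
import Mathlib
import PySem

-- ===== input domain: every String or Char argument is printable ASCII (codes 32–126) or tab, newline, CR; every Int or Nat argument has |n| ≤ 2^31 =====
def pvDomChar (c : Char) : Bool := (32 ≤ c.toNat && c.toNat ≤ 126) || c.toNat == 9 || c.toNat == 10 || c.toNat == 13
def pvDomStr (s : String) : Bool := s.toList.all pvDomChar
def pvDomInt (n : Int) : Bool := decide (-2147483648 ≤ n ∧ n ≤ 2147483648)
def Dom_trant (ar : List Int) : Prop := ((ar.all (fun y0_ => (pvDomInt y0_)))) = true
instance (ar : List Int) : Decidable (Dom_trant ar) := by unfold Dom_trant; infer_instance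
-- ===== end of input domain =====

-- B replaces A's reverse-indexed loop with a power accumulator by a forward Horner pass (simpler, same O(n) cost).


-- ===== PORT A =====
-- while a >= 0: runs for indices a = len-1, len-2, …, 0; fuel = a+1
def trantLoop (ar : List Int) : Nat → Int → Int → Int
  | 0, val, _ => val
  | Nat.succ a', val, sq =>
      let x := (PySem.List.pyGet? ar (a' : Int)).getD 0   -- ar[a], index always in range here
      let val' := if x ≠ 0 then val + x * sq else val
      trantLoop ar a' val' (sq * 3)

def trant (ar : List Int) : Int := trantLoop ar ar.length 0 1

-- ===== PORT B =====
def trant_alt (ar : List Int) : Int := ar.foldl (fun val d => val * 3 + d) 0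

-- ===== PRECONDITION & SPEC =====
def Spec_trant (ar : List Int) (out : Int) : Prop := out = trant_alt ar
instance (ar : List Int) (out : Int) : Decidable (Spec_trant ar out) := by unfold Spec_trant; infer_instance

-- ===== CLAIM (what is proved, stated in full; the proofs are below) =====
def Claim_equal_trant : Prop := ∀ (ar : List Int), Dom_trant ar → Spec_trant ar (trant ar)

-- ===== LEMMAS AND PROOFS =====

theorem horner_take_succ (ar : List Int) (n : Nat) (h : n < ar.length) :
    (ar.take (n+1)).foldl (fun val d => val * 3 + d) 0
      = (ar.take n).foldl (fun val d => val * 3 + d) 0 * 3 + ar[n] := by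
  rw [List.take_add_one, List.getElem?_eq_getElem h]
  rw [Option.toList_some, List.foldl_append, List.foldl_cons, List.foldl_nil]

theorem trantLoop_eq (ar : List Int) (n : Nat) (h : n ≤ ar.length) (val sq : Int) :
    trantLoop ar n val sq
      = val + sq * (ar.take n).foldl (fun val d => val * 3 + d) 0 := by
  induction n generalizing val sq with
  | zero => simp [trantLoop]
  | succ a' ih =>
      have ha : a' < ar.length := h
      rw [trantLoop, ih (Nat.le_of_lt ha), horner_take_succ ar a' ha]
      simp [PySem.List.pyGet?_natCast, List.getElem?_eq_getElem ha]
      by_cases hx : ar[a'] = 0 <;> simp [hx] <;> ring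

-- ===== VERDICT (by name: the statement is the Claim_ definition above) =====
theorem trant_spec : Claim_equal_trant := by
  intro ar _
  unfold Spec_trant trant trant_alt
  rw [trantLoop_eq ar ar.length le_rfl 0 1]
  simp
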